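-- pv_equiv track=rewrite | github.com/aristotle0x01/Grokking-the-Coding-Interview-Pattern | 5. Pattern Cyclic Sort/Problem Challenge 1 - Find the Corrupt Pair (easy).py | find_corrupt_pair
-- ===== SOURCE A (Python) =====
-- def find_corrupt_pair(array):
--     index = 0
--     n = len(array)
--
--     while index < n:
--         i = array[index] - 1
--         if array[index] != (index + 1):
--             # 存在冗余，跳出死循环，此时下标index元素没有交换位置
--             # 但是迟早会被该在那个位置上的元素交换，除非那个位置上的元素缺失
--             if array[i] == array[index]:
--                 index = index + 1
--                 continue
--
--             array[i], array[index] = array[index], array[i]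
--         else:
--             index = index + 1
--
--     r = []
--     for i in range(len(array)):
--         if array[i] != (i+1):
--             r.append(array[i])
--             r.append(i+1)
--             break
--     return r
-- ===== SOURCE B (Python) =====
-- def find_corrupt_pair(array):
--     n = len(array)
--     result = [None] * n
--     duplicate = None
--     for x in array:
--         if result[x - 1] == x:
--             duplicate = x
--         else:
--             result[x - 1] = x
--     for i in range(n):
--         if result[i] != i + 1:
--             return [duplicate if result[i] is None else result[i], i + 1]
--     return []
-- ===== Notes on version B (the rewrite author's own statement) =====
-- stated objective: alternative
-- what changed: Replaces A's in-place cyclic sort (repeated swapping until every value sits at the slot array[value-1] denotes, then a scan for the first mismatch) by a single placement pass into a fresh bucket list (result[x-1] = x, remembering a re-seen value as the duplicate) followed by a direct scan for the first corrupt slot; same O(n) cost, and B does not mutate the input array (A does; the claim is about the return value only). Pre_ excludes arrays with a value outside [1-n, n] (A raises IndexError), arrays where two distinct values share one target slot (A loops forever, e.g. …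
-- outside the precondition, e.g. on find_corrupt_pair([1, 1, 2, 2]): A returns [1, 3], B returns [2, 3]; on find_corrupt_pair([7]): A raises IndexError, B raises IndexError; on find_corrupt_pair([0, 2]): A does not finish within the time limit, B returns [None, 1]
import Mathlib
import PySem

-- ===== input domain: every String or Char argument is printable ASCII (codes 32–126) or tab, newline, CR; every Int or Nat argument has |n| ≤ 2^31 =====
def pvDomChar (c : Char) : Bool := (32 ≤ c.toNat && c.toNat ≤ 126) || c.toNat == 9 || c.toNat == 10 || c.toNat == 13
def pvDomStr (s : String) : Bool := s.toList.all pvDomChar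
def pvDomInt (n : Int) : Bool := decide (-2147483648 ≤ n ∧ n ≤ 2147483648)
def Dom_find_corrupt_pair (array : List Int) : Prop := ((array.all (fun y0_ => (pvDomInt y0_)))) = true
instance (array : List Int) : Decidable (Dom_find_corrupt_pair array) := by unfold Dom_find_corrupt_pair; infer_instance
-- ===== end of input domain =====

-- B replaces A's in-place cyclic sort (repeated swapping until every value sits at the
-- slot array[value-1] denotes, then a scan for the first mismatch) by a single placement
-- pass into a fresh bucket list (result[x-1] = x, remembering the re-seen value as the
-- duplicate) followed by a direct scan for the first corrupt slot. Same O(n) cost, a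
-- different algorithm; A mutates its argument in place, B does not: the claim is about
-- the RETURN value only.

-- ===== PORT A =====
-- while loop of A: index/swap steps; fuel 2*len+1 is proved sufficient under Pre_
-- (each step either advances `index` or strictly increases the number of values sitting in
-- their own target slot); the `none` branch of pyGet? is Python's IndexError (outside Pre_).
def pvLoopA (fuel : Nat) (a : List Int) (index : Nat) : List Int :=
  match fuel with
  | 0 => a
  | fuel + 1 =>
    if h : index < a.length then
      if a[index] ≠ (index : Int) + 1 then
        match PySem.List.pyGet? a (a[index] - 1) with
        | none => a   -- Python raises IndexError here; excluded by Pre_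
        | some w =>
          if w = a[index] then
            pvLoopA fuel a (index + 1)
          else
            pvLoopA fuel (PySem.List.pySetD (PySem.List.pySetD a (a[index] - 1) a[index]) (index : Int) w) index
      else
        pvLoopA fuel a (index + 1)
    else a

-- final 'for i in range(len(array))' scan with break
def pvScanA (a : List Int) (i : Nat) : List Int :=
  if h : i < a.length then
    if a[i] ≠ (i : Int) + 1 then [a[i], (i : Int) + 1]
    else pvScanA a (i + 1)
  else []
termination_by a.length - i

def find_corrupt_pair (array : List Int) : List Int :=
  pvScanA (pvLoopA (2 * array.length + 1) array 0) 0

-- ===== PORT B =====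
-- 'for x in array' placing each value into its bucket result[x - 1], remembering the
-- re-seen value as the duplicate; the `none` branch of pyGet? is Python's IndexError
-- (excluded by Pre_)
def pvLoopB (xs : List Int) (res : List (Option Int)) (dup : Option Int) :
    List (Option Int) × Option Int :=
  match xs with
  | [] => (res, dup)
  | x :: rest =>
    match PySem.List.pyGet? res (x - 1) with
    | none => (res, dup)   -- Python raises IndexError here; excluded by Pre_
    | some cur =>
      if cur = some x then pvLoopB rest res (some x)
      else pvLoopB rest (PySem.List.pySetD res (x - 1) (some x)) dup

-- final 'for i in range(n)' scan with early return; Python's None duplicate is ported as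
-- dup.getD 0 (under Pre_ an empty bucket implies a duplicate was seen, proved below, so
-- the 0 standing for Python's None is never the value returned)
def pvScanB (res : List (Option Int)) (dup : Option Int) (i : Nat) : List Int :=
  if h : i < res.length then
    if res[i] ≠ some ((i : Int) + 1) then
      [(res[i]).getD (dup.getD 0), (i : Int) + 1]
    else pvScanB res dup (i + 1)
  else []
termination_by res.length - i

def find_corrupt_pair_alt (array : List Int) : List Int :=
  let r := pvLoopB array (List.replicate array.length none) none
  pvScanB r.1 r.2 0

-- ===== PRECONDITION & SPEC =====
-- Pre_ is the domain on which A's while loop provably terminates: every value indexable by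
-- A (between 1-n and n; outside, A's array[array[index]-1] raises IndexError), no two
-- distinct values sharing one target slot (on such inputs A loops forever, e.g. [0, 2]),
-- and at most one DISTINCT value repeated (with two repeated values which pair is reported
-- is an arbitrary choice: A's depends on the order its swaps meet the copies, B reports the
-- later duplicate; see claim.json "cites").
def Pre_find_corrupt_pair (array : List Int) : Prop :=
  (∀ x ∈ array, 1 - (array.length : Int) ≤ x ∧ x ≤ (array.length : Int)) ∧
  (∀ x ∈ array, ∀ y ∈ array,
    (x - 1) % (array.length : Int) = (y - 1) % (array.length : Int) → x = y) ∧
  (∀ x ∈ array, ∀ y ∈ array, 2 ≤ array.count x → 2 ≤ array.count y → x = y)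
instance (array : List Int) : Decidable (Pre_find_corrupt_pair array) := by
  unfold Pre_find_corrupt_pair; infer_instance

def pvWitness_find_corrupt_pair : List Int := [3, 1, 2, 3, 5]

def Spec_find_corrupt_pair (array : List Int) (out : List Int) : Prop := out = find_corrupt_pair_alt array
instance (array : List Int) (out : List Int) : Decidable (Spec_find_corrupt_pair array out) := by unfold Spec_find_corrupt_pair; infer_instance

-- ===== CLAIM (what is proved, stated in full; the proofs are below) =====
def Claim_equal_find_corrupt_pair : Prop := ∀ (array : List Int), Dom_find_corrupt_pair array → Pre_find_corrupt_pair array → Spec_find_corrupt_pair array (find_corrupt_pair array)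

-- ===== LEMMAS AND PROOFS =====

-- the slot Python's array[u-1] denotes, as a list index
def pvHome (n : Int) (u : Int) : Nat := ((u - 1) % n).toNat

-- number of values not sitting in their own slot (the decreasing part of the loop measure)
def pvBad (a : List Int) : Nat :=
  (List.range a.length).countP (fun j => pvHome (a.length : Int) (a.getD j 0) ≠ j)

-- loop invariant for positions already passed: in place, or its value sits in its own slot
def pvGood (a : List Int) (j : Nat) : Prop :=
  a.getD j 0 = (j : Int) + 1 ∨ a.getD (pvHome (a.length : Int) (a.getD j 0)) 0 = a.getD j 0

def pvInv (a0 a : List Int) (idx : Nat) : Prop :=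
  a.Perm a0 ∧ idx ≤ a.length ∧ ∀ j < idx, pvGood a j

lemma pv_pyGet_mod {α : Type} (xs : List α) (i : Int) (h1 : -(xs.length : Int) ≤ i) (h2 : i < xs.length) :
    PySem.List.pyGet? xs i = xs[(i % (xs.length : Int)).toNat]? := by
  have hn : 0 < xs.length := by omega
  simp only [PySem.List.pyGet?, PySem.List.pyIdx?]
  by_cases h0 : 0 ≤ i
  · rw [if_pos h0, if_pos h2]
    have : (i % (xs.length : Int)).toNat = i.toNat := by
      rw [Int.emod_eq_of_lt h0 h2]
    rw [this]
    rfl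
  · rw [if_neg h0, if_pos h1]
    have he : (i + (xs.length : Int)) % (xs.length : Int) = i % (xs.length : Int) := by
      simpa using Int.add_mul_emod_self_left (a := i) (b := (xs.length : Int)) (c := 1)
    have : (i % (xs.length : Int)).toNat = xs.length - (-i).toNat := by
      rw [← he, Int.emod_eq_of_lt (by omega) (by omega)]
      omega
    rw [this]
    rfl

lemma pv_pySetD_mod {α : Type} (xs : List α) (i : Int) (v : α)
    (h1 : -(xs.length : Int) ≤ i) (h2 : i < xs.length) :
    PySem.List.pySetD xs i v = xs.set (i % (xs.length : Int)).toNat v := by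
  have hn : 0 < xs.length := by omega
  simp only [PySem.List.pySetD, PySem.List.pySet?, PySem.List.pyIdx?]
  by_cases h0 : 0 ≤ i
  · rw [if_pos h0, if_pos h2]
    have : (i % (xs.length : Int)).toNat = i.toNat := by
      rw [Int.emod_eq_of_lt h0 h2]
    rw [this]
    rfl
  · rw [if_neg h0, if_pos h1]
    have he : (i + (xs.length : Int)) % (xs.length : Int) = i % (xs.length : Int) := by
      simpa using Int.add_mul_emod_self_left (a := i) (b := (xs.length : Int)) (c := 1)
    have : (i % (xs.length : Int)).toNat = xs.length - (-i).toNat := by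
      rw [← he, Int.emod_eq_of_lt (by omega) (by omega)]
      omega
    rw [this]
    rfl

lemma pv_countP_lt {p q : Nat → Bool} (l : List Nat)
    (h : ∀ x ∈ l, p x → q x) (x : Nat) (hx : x ∈ l) (hpx : p x = false) (hqx : q x = true) :
    l.countP p < l.countP q := by
  induction l with
  | nil => cases hx
  | cons y t ih =>
    rw [List.countP_cons, List.countP_cons]
    rcases List.mem_cons.mp hx with rfl | hxt
    · have h1 : t.countP p ≤ t.countP q :=
        List.countP_mono_left (fun z hz => h z (List.mem_cons_of_mem _ hz))
      simp [hpx, hqx]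
      all_goals omega
    · have hy : p y = true → q y = true := h y (List.mem_cons_self)
      have h2 := ih (fun z hz => h z (List.mem_cons_of_mem _ hz)) hxt
      by_cases hpy : p y = true
      · simp [hpy, hy hpy]
        all_goals omega
      · simp only [Bool.not_eq_true] at hpy
        simp [hpy]
        split <;> omega

lemma pv_getD_swap (a : List Int) (i idx : Nat) (v w : Int) (j : Nat) (hne : j ≠ idx) (hni : j ≠ i) :
    ((a.set i v).set idx w).getD j 0 = a.getD j 0 := by
  by_cases hj : j < a.length
  · have hj1 : j < ((a.set i v).set idx w).length := by simpa using hj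
    rw [List.getD_eq_getElem _ _ hj1, List.getD_eq_getElem _ _ hj,
        List.getElem_set, if_neg (fun hh => hne hh.symm),
        List.getElem_set, if_neg (fun hh => hni hh.symm)]
  · rw [List.getD_eq_default _ _ (by simpa using Nat.le_of_not_lt hj),
        List.getD_eq_default _ _ (Nat.le_of_not_lt hj)]

lemma pvLoopA_post (a0 : List Int)
    (hr : ∀ x ∈ a0, 1 - (a0.length : Int) ≤ x ∧ x ≤ (a0.length : Int))
    (hinj : ∀ x ∈ a0, ∀ y ∈ a0,
      (x - 1) % (a0.length : Int) = (y - 1) % (a0.length : Int) → x = y) :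
    ∀ fuel a idx, pvInv a0 a idx → (a.length - idx) + pvBad a < fuel →
      pvInv a0 (pvLoopA fuel a idx) (pvLoopA fuel a idx).length := by
  intro fuel
  induction fuel with
  | zero => intro a idx _ hm; omega
  | succ fuel ih =>
    intro a idx hinv hm
    obtain ⟨hperm, hidx, hgood⟩ := hinv
    have hlen : a.length = a0.length := hperm.length_eq
    rw [pvLoopA]
    by_cases h : idx < a.length
    · rw [dif_pos h]
      have hn : 0 < a.length := by omega
      have hgDa : ∀ (j : Nat) (hj : j < a.length), a.getD j 0 = a[j] :=
        fun j hj => List.getD_eq_getElem _ _ hj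
      by_cases hv : a[idx] = (idx : Int) + 1
      · -- already in place: advance index
        rw [if_neg (by simpa using hv)]
        refine ih a (idx + 1) ⟨hperm, h, ?_⟩ (by omega)
        intro j hj
        rcases Nat.lt_succ_iff_lt_or_eq.mp hj with hj' | hje
        · exact hgood j hj'
        · subst hje
          exact Or.inl (by rw [hgDa j h]; exact hv)
      · rw [if_pos (by simpa using hv)]
        have hvmem : a[idx] ∈ a0 := hperm.subset (List.getElem_mem h)
        have hrange := hr _ hvmem
        have hib1 : -(a.length : Int) ≤ a[idx] - 1 := by omega
        have hib2 : a[idx] - 1 < (a.length : Int) := by omega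
        have hemod1 : 0 ≤ (a[idx] - 1) % (a.length : Int) :=
          Int.emod_nonneg _ (by omega)
        have hemod2 : (a[idx] - 1) % (a.length : Int) < (a.length : Int) :=
          Int.emod_lt_of_pos _ (by omega)
        have hilt : ((a[idx] - 1) % (a.length : Int)).toNat < a.length := by omega
        rw [pv_pyGet_mod a _ hib1 hib2, List.getElem?_eq_getElem hilt]
        dsimp only
        set i := ((a[idx] - 1) % (a.length : Int)).toNat with hidef
        have hhome : pvHome (a.length : Int) a[idx] = i := by
          unfold pvHome
          rw [hidef]
        by_cases hw : a[i] = a[idx]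
        · -- the slot already holds this value (a duplicate): advance index
          rw [if_pos hw]
          refine ih a (idx + 1) ⟨hperm, h, ?_⟩ (by omega)
          intro j hj
          rcases Nat.lt_succ_iff_lt_or_eq.mp hj with hj' | hje
          · exact hgood j hj'
          · subst hje
            refine Or.inr ?_
            rw [hgDa j h, hhome, hgDa i hilt]
            exact hw
        · -- swap
          rw [if_neg hw]
          have hsetEq : PySem.List.pySetD a (a[idx] - 1) a[idx] = a.set i a[idx] := by
            rw [pv_pySetD_mod a _ _ hib1 hib2, hidef]
          rw [hsetEq, PySem.List.pySetD_natCast]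
          set a' := (a.set i a[idx]).set idx a[i] with ha'
          have hwD : ¬ a.getD i 0 = a[idx] := by
            rw [hgDa i hilt]
            exact hw
          have hvD : ¬ a.getD idx 0 = (idx : Int) + 1 := by
            rw [hgDa idx h]
            exact hv
          have hine : i ≠ idx := by
            intro hh
            apply hwD
            rw [hh, hgDa idx h]
          have hperm' : a'.Perm a := List.set_set_perm hilt h
          have hlen' : a'.length = a.length := hperm'.length_eq
          have hgetD : ∀ j : Nat, j ≠ idx → j ≠ i → a'.getD j 0 = a.getD j 0 := by
            intro j h1 h2
            exact pv_getD_swap a i idx _ _ j h1 h2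
          have hgetDi : a'.getD i 0 = a[idx] := by
            rw [ha', List.getD_eq_getElem _ _ (by simpa using hilt), List.getElem_set,
              if_neg (fun hh => hine hh.symm), List.getElem_set, if_pos rfl]
          have hmema : ∀ (j : Nat) (hj : j < a.length), a.getD j 0 ∈ a0 := by
            intro j hj
            rw [hgDa j hj]
            exact hperm.subset (List.getElem_mem hj)
          have hinjA : ∀ x ∈ a0, ∀ y ∈ a0,
              pvHome (a.length : Int) x = pvHome (a.length : Int) y → x = y := by
            intro x hx y hy hh
            apply hinj x hx y hy
            unfold pvHome at hh
            rw [hlen] at hh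
            have h1 : 0 ≤ (x - 1) % (a0.length : Int) := Int.emod_nonneg _ (by omega)
            have h2 : 0 ≤ (y - 1) % (a0.length : Int) := Int.emod_nonneg _ (by omega)
            omega
          -- the out-of-slot count strictly drops
          have hbad : pvBad a' < pvBad a := by
            unfold pvBad
            rw [hlen']
            refine pv_countP_lt (List.range a.length) ?_ i (List.mem_range.mpr hilt) ?_ ?_
            · intro j hj hpj
              simp only [decide_eq_true_eq] at hpj ⊢
              by_cases h1 : j = idx
              · rw [h1, hgDa idx h, hhome]
                exact hine
              · by_cases h2 : j = i
                · exfalso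
                  rw [h2, hgetDi, hhome] at hpj
                  exact hpj rfl
                · rw [hgetD j h1 h2] at hpj
                  exact hpj
            · simp only [decide_eq_false_iff_not, Decidable.not_not]
              rw [hgetDi, hhome]
            · simp only [decide_eq_true_eq]
              intro hh
              exact hwD (hinjA _ (hmema i hilt) _ hvmem (hh.trans hhome.symm))
          refine ih a' idx ⟨hperm'.trans hperm, by omega, ?_⟩ (by omega)
          intro j hj
          have hjlen : j < a.length := by omega
          unfold pvGood
          rw [hlen']
          by_cases hji : j = i
          · refine Or.inr ?_
            rw [hji, hgetDi, hhome]
            exact hgetDi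
          · have hju : a'.getD j 0 = a.getD j 0 := hgetD j (by omega) hji
            rcases hgood j hj with h1 | h2
            · exact Or.inl (by rw [hju, h1])
            · refine Or.inr ?_
              rw [hju]
              set u := a.getD j 0 with hu
              set t := pvHome (a.length : Int) u with ht
              have humem : u ∈ a0 := hmema j hjlen
              have htne_idx : t ≠ idx := by
                intro hh
                apply hine
                have hux : u = a[idx] := by
                  rw [← hgDa idx h, ← hh]
                  exact h2.symm
                rw [← hhome, ← hux, ← ht, hh]
              have htne_i : t ≠ i := by
                intro hh
                apply hwD
                have huv : u = a[idx] :=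
                  hinjA u humem _ hvmem (by rw [← ht, hh, hhome])
                have hx : a.getD i 0 = u := by
                  rw [← hh]
                  exact h2
                rw [hx, huv]
              rw [hgetD _ htne_idx htne_i]
              exact h2
    · rw [dif_neg h]
      exact ⟨hperm, le_rfl, fun j hj => hgood j (by omega)⟩

lemma pv_count_positions (a : List Int) (x : Int) :
    a.count x = (List.range a.length).countP (fun j => a.getD j 0 = x) := by
  induction a with
  | nil => simp
  | cons y t ih =>
    simp only [List.length_cons, List.range_succ_eq_map, List.countP_cons, List.countP_map,
      List.count_cons, ih]
    have he : ((fun j => decide (List.getD (y :: t) j 0 = x)) ∘ Nat.succ)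
        = (fun j => decide (List.getD t j 0 = x)) := by
      funext j
      simp
    rw [he]
    by_cases hyx : y = x <;> simp [hyx]

lemma pv_scan_nil (b : List Int) (hs : ∀ j < b.length, b.getD j 0 = (j : Int) + 1) :
    ∀ i, pvScanA b i = [] := by
  intro i
  have haux : ∀ k i, b.length - i ≤ k → pvScanA b i = [] := by
    intro k
    induction k with
    | zero =>
      intro i hk
      rw [pvScanA, dif_neg (by omega)]
    | succ k ih =>
      intro i hk
      rw [pvScanA]
      by_cases h : i < b.length
      · rw [dif_pos h, if_neg]
        · exact ih (i + 1) (by omega)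
        · have := hs i h
          rw [List.getD_eq_getElem _ _ h] at this
          simp [this]
      · rw [dif_neg h]
  exact haux (b.length - i) i le_rfl

lemma pv_scan_defect (b : List Int) (p : Nat) (hp : p < b.length)
    (hbefore : ∀ j < p, b.getD j 0 = (j : Int) + 1) (hdef : b.getD p 0 ≠ (p : Int) + 1) :
    ∀ i ≤ p, pvScanA b i = [b.getD p 0, (p : Int) + 1] := by
  have haux : ∀ k i, i ≤ p → p - i ≤ k → pvScanA b i = [b.getD p 0, (p : Int) + 1] := by
    intro k
    induction k with
    | zero =>
      intro i hip hk
      have : i = p := by omega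
      subst this
      rw [pvScanA, dif_pos hp, if_pos]
      · rw [List.getD_eq_getElem _ _ hp]
      · rw [List.getD_eq_getElem _ _ hp] at hdef
        simpa using hdef
    | succ k ih =>
      intro i hip hk
      by_cases hipe : i = p
      · subst hipe
        rw [pvScanA, dif_pos hp, if_pos]
        · rw [List.getD_eq_getElem _ _ hp]
        · rw [List.getD_eq_getElem _ _ hp] at hdef
          simpa using hdef
      · have hilt : i < p := lt_of_le_of_ne hip hipe
        rw [pvScanA, dif_pos (by omega), if_neg]
        · exact ih (i + 1) (by omega) (by omega)
        · have := hbefore i hilt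
          rw [List.getD_eq_getElem _ _ (by omega)] at this
          simp [this]
  exact fun i hip => haux (p - i) i hip le_rfl

lemma pv_pos_count (b : List Int) (d : Int) (L : List Nat)
    (hnd : L.Nodup) (hL : ∀ j ∈ L, j < b.length ∧ b.getD j 0 = d) :
    L.length ≤ b.count d := by
  rw [pv_count_positions, List.countP_eq_length_filter]
  refine (hnd.subperm ?_).length_le
  intro j hj
  rw [List.mem_filter, List.mem_range]
  exact ⟨(hL j hj).1, by simpa using (hL j hj).2⟩

lemma pv_last_occ_split (a : List Int) (d : Int) (hd : d ∈ a) :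
    ∃ u w, a = u ++ d :: w ∧ d ∉ w ∧ u.count d = a.count d - 1 := by
  induction a with
  | nil => cases hd
  | cons y t ih =>
    by_cases hdt : d ∈ t
    · obtain ⟨u, w, he, hw, hc⟩ := ih hdt
      refine ⟨y :: u, w, by rw [he]; rfl, hw, ?_⟩
      have hpos : 0 < t.count d := List.count_pos_iff.mpr hdt
      rw [List.count_cons, List.count_cons, he, List.count_append, List.count_cons] at *
      omega
    · have hyd : y = d := by
        rcases List.mem_cons.mp hd with h1 | h2
        · exact h1.symm
        · exact absurd h2 hdt
      subst hyd
      refine ⟨[], t, rfl, hdt, ?_⟩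
      simp [List.count_eq_zero.mpr hdt]

-- a value at an out-of-place position either sits in its own slot (and is then ≤ 0) or is duplicated
lemma pv_defect_cases (b : List Int) (j : Nat)
    (hr : ∀ x ∈ b, 1 - (b.length : Int) ≤ x ∧ x ≤ (b.length : Int))
    (hg : ∀ j < b.length, pvGood b j)
    (hj : j < b.length) (hdef : b.getD j 0 ≠ (j : Int) + 1) :
    (b.getD j 0 ≤ 0 ∧ pvHome (b.length : Int) (b.getD j 0) = j) ∨ 2 ≤ b.count (b.getD j 0) := by
  rcases hg j hj with h1 | h2
  · exact absurd h1 hdef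
  · set u := b.getD j 0 with hu
    set t := pvHome (b.length : Int) u with ht
    have hum : u ∈ b := by rw [hu, List.getD_eq_getElem _ _ hj]; exact List.getElem_mem hj
    have hur := hr u hum
    by_cases hts : t = j
    · left
      refine ⟨?_, hts⟩
      by_contra hpos
      apply hdef
      have hmod : (u - 1) % (b.length : Int) = u - 1 :=
        Int.emod_eq_of_lt (by omega) (by omega)
      have : ((u - 1) % (b.length : Int)).toNat = j := by
        rw [← hts, ht]
        unfold pvHome
        rfl
      rw [hmod] at this
      omega
    · right
      have hn : 0 < b.length := by omega
      have htlt : t < b.length := by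
        rw [ht]
        unfold pvHome
        have h1 : 0 ≤ (u - 1) % (b.length : Int) := Int.emod_nonneg _ (by omega)
        have h2 : (u - 1) % (b.length : Int) < (b.length : Int) :=
          Int.emod_lt_of_pos _ (by omega)
        omega
      have := pv_pos_count b u [j, t] (by simp; omega)
        (by
          intro m hm
          rcases List.mem_pair.mp hm with rfl | rfl
          · exact ⟨hj, hu.symm⟩
          · exact ⟨htlt, h2⟩)
      simpa using this

-- ===== B-side lemmas =====

-- reading / writing the bucket list at a value's target slot
lemma pv_res_get (res : List (Option Int)) (n : Nat) (hlen : res.length = n) (x : Int)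
    (h1 : 1 - (n : Int) ≤ x) (h2 : x ≤ (n : Int)) (hn : 0 < n) :
    PySem.List.pyGet? res (x - 1) = some (res.getD (pvHome (n : Int) x) none) := by
  subst hlen
  have hm1 : 0 ≤ (x - 1) % (res.length : Int) := Int.emod_nonneg _ (by omega)
  have hm2 : (x - 1) % (res.length : Int) < (res.length : Int) :=
    Int.emod_lt_of_pos _ (by omega)
  have hlt : ((x - 1) % (res.length : Int)).toNat < res.length := by omega
  rw [pv_pyGet_mod res (x - 1) (by omega) (by omega), List.getElem?_eq_getElem hlt]
  unfold pvHome
  rw [List.getD_eq_getElem _ _ hlt]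

lemma pv_res_set (res : List (Option Int)) (n : Nat) (hlen : res.length = n) (x : Int)
    (v : Option Int) (h1 : 1 - (n : Int) ≤ x) (h2 : x ≤ (n : Int)) (hn : 0 < n) :
    PySem.List.pySetD res (x - 1) v = res.set (pvHome (n : Int) x) v := by
  subst hlen
  rw [pv_pySetD_mod res (x - 1) v (by omega) (by omega)]
  rfl

lemma pv_getD_set_ne {α : Type} (l : List α) (k j : Nat) (w d : α) (h : j ≠ k) :
    (l.set k w).getD j d = l.getD j d := by
  by_cases hj : j < l.length
  · rw [List.getD_eq_getElem _ _ (by simpa using hj), List.getD_eq_getElem _ _ hj,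
      List.getElem_set, if_neg (fun hh => h hh.symm)]
  · rw [List.getD_eq_default _ _ (by simpa using Nat.le_of_not_lt hj),
      List.getD_eq_default _ _ (Nat.le_of_not_lt hj)]

lemma pv_getD_set_self {α : Type} (l : List α) (k : Nat) (w d : α) (h : k < l.length) :
    (l.set k w).getD k d = w := by
  rw [List.getD_eq_getElem _ _ (by simpa using h), List.getElem_set, if_pos rfl]

-- a cons step of B's loop, once the bucket read is known to succeed
lemma pvLoopB_cons_in (x : Int) (rest : List Int) (res : List (Option Int))
    (dup : Option Int) (c : Option Int) (h : PySem.List.pyGet? res (x - 1) = some c) :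
    pvLoopB (x :: rest) res dup
      = if c = some x then pvLoopB rest res (some x)
        else pvLoopB rest (PySem.List.pySetD res (x - 1) (some x)) dup := by
  rw [pvLoopB, h]

lemma pvLoopB_append (xs ys : List Int) : ∀ res dup, 0 < res.length →
    (∀ x ∈ xs, 1 - (res.length : Int) ≤ x ∧ x ≤ (res.length : Int)) →
    pvLoopB (xs ++ ys) res dup
      = pvLoopB ys (pvLoopB xs res dup).1 (pvLoopB xs res dup).2 := by
  induction xs with
  | nil => intro res dup _ _; rfl
  | cons x rest ih =>
    intro res dup hn hbnd
    have hb := hbnd x List.mem_cons_self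
    rw [List.cons_append,
      pvLoopB_cons_in x (rest ++ ys) res dup _ (pv_res_get res res.length rfl x hb.1 hb.2 hn),
      pvLoopB_cons_in x rest res dup _ (pv_res_get res res.length rfl x hb.1 hb.2 hn)]
    by_cases h : res.getD (pvHome (res.length : Int) x) none = some x
    · rw [if_pos h, if_pos h,
        ih res (some x) hn (fun y hy => hbnd y (List.mem_cons_of_mem _ hy))]
    · rw [if_neg h, if_neg h]
      have hlen : (PySem.List.pySetD res (x - 1) (some x)).length = res.length :=
        PySem.List.length_pySetD res (x - 1) (some x)
      rw [ih (PySem.List.pySetD res (x - 1) (some x)) dup (by omega)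
        (by rw [hlen]; exact fun y hy => hbnd y (List.mem_cons_of_mem _ hy))]

-- target slots are injective over the array's values, and always in range
lemma pv_home_inj (a : List Int)
    (hinj : ∀ x ∈ a, ∀ y ∈ a,
      (x - 1) % (a.length : Int) = (y - 1) % (a.length : Int) → x = y) :
    ∀ x ∈ a, ∀ y ∈ a,
      pvHome (a.length : Int) x = pvHome (a.length : Int) y → x = y := by
  intro x hx y hy hh
  have hn : 0 < a.length := List.length_pos_iff.mpr (List.ne_nil_of_mem hx)
  apply hinj x hx y hy
  unfold pvHome at hh
  have h1 : 0 ≤ (x - 1) % (a.length : Int) := Int.emod_nonneg _ (by omega)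
  have h2 : 0 ≤ (y - 1) % (a.length : Int) := Int.emod_nonneg _ (by omega)
  omega

lemma pv_home_lt (n : Nat) (x : Int) (hn : 0 < n) : pvHome (n : Int) x < n := by
  unfold pvHome
  have h1 : 0 ≤ (x - 1) % (n : Int) := Int.emod_nonneg _ (by omega)
  have h2 : (x - 1) % (n : Int) < (n : Int) := Int.emod_lt_of_pos _ (by omega)
  omega

-- the bucket list built by B's first loop holds exactly the values of the processed
-- prefix, each in its target slot
def pvResInv (nL : Nat) (pre : List Int) (res : List (Option Int)) : Prop :=
  res.length = nL ∧ ∀ j, j < nL → ∀ v : Int,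
    (res.getD j none = some v ↔ (v ∈ pre ∧ pvHome (nL : Int) v = j))

lemma pv_inv_skip (nL : Nat) (pre : List Int) (res : List (Option Int)) (x : Int)
    (hinv : pvResInv nL pre res)
    (hx : res.getD (pvHome (nL : Int) x) none = some x) :
    pvResInv nL (pre ++ [x]) res := by
  obtain ⟨hlen, hiff⟩ := hinv
  refine ⟨hlen, ?_⟩
  intro j hj v
  constructor
  · intro h
    obtain ⟨h1, h2⟩ := (hiff j hj v).mp h
    exact ⟨List.mem_append_left _ h1, h2⟩
  · rintro ⟨hv, hk⟩
    rcases List.mem_append.mp hv with h1 | h1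
    · exact (hiff j hj v).mpr ⟨h1, hk⟩
    · have hvx : v = x := by simpa using h1
      subst hvx
      rw [← hk]
      exact hx

lemma pv_inv_insert (nL : Nat) (pre : List Int) (res : List (Option Int)) (x : Int)
    (hinv : pvResInv nL pre res)
    (hx : ¬ res.getD (pvHome (nL : Int) x) none = some x)
    (hpinj : ∀ p ∈ pre, pvHome (nL : Int) p = pvHome (nL : Int) x → p = x)
    (hxlt : pvHome (nL : Int) x < nL) :
    pvResInv nL (pre ++ [x]) (res.set (pvHome (nL : Int) x) (some x)) := by
  obtain ⟨hlen, hiff⟩ := hinv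
  refine ⟨by simp [hlen], ?_⟩
  intro j hj v
  by_cases hjx : j = pvHome (nL : Int) x
  · subst hjx
    rw [pv_getD_set_self res _ _ _ (by omega)]
    constructor
    · intro hsv
      have hvx : x = v := by injection hsv
      subst hvx
      exact ⟨List.mem_append_right _ List.mem_cons_self, rfl⟩
    · rintro ⟨hv, hk⟩
      rcases List.mem_append.mp hv with h1 | h1
      · rw [hpinj v h1 hk]
      · have hvx : v = x := by simpa using h1
        rw [hvx]
  · rw [pv_getD_set_ne res _ _ _ _ hjx]
    constructor
    · intro h
      obtain ⟨h1, h2⟩ := (hiff j hj v).mp h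
      exact ⟨List.mem_append_left _ h1, h2⟩
    · rintro ⟨hv, hk⟩
      rcases List.mem_append.mp hv with h1 | h1
      · exact (hiff j hj v).mpr ⟨h1, hk⟩
      · have hvx : v = x := by simpa using h1
        subst hvx
        exact absurd hk.symm hjx

lemma pvLoopB_resInv (a : List Int)
    (hr : ∀ x ∈ a, 1 - (a.length : Int) ≤ x ∧ x ≤ (a.length : Int))
    (hinj : ∀ x ∈ a, ∀ y ∈ a,
      (x - 1) % (a.length : Int) = (y - 1) % (a.length : Int) → x = y) :
    ∀ xs pre res dup, (∀ x ∈ pre ++ xs, x ∈ a) → pvResInv a.length pre res →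
      pvResInv a.length (pre ++ xs) (pvLoopB xs res dup).1 := by
  intro xs
  induction xs with
  | nil =>
    intro pre res dup _ hinv
    rw [pvLoopB, List.append_nil]
    exact hinv
  | cons x rest ih =>
    intro pre res dup hsub hinv
    have hxa : x ∈ a := hsub x (List.mem_append_right _ List.mem_cons_self)
    have hn : 0 < a.length := List.length_pos_iff.mpr (List.ne_nil_of_mem hxa)
    have hb := hr x hxa
    have hassoc : pre ++ x :: rest = (pre ++ [x]) ++ rest := by simp
    rw [pvLoopB_cons_in x rest res dup _
      (pv_res_get res a.length hinv.1 x hb.1 hb.2 hn), hassoc]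
    by_cases hc : res.getD (pvHome (a.length : Int) x) none = some x
    · rw [if_pos hc]
      exact ih (pre ++ [x]) res (some x) (by rw [← hassoc]; exact hsub)
        (pv_inv_skip _ pre res x hinv hc)
    · rw [if_neg hc,
        pv_res_set res a.length hinv.1 x (some x) hb.1 hb.2 hn]
      refine ih (pre ++ [x]) _ dup (by rw [← hassoc]; exact hsub)
        (pv_inv_insert _ pre res x hinv hc ?_ (pv_home_lt _ _ hn))
      intro p hp
      exact pv_home_inj a hinj p (hsub p (List.mem_append_left _ hp)) x hxa

lemma pvLoopB_dup_fresh (a : List Int)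
    (hr : ∀ x ∈ a, 1 - (a.length : Int) ≤ x ∧ x ≤ (a.length : Int))
    (hinj : ∀ x ∈ a, ∀ y ∈ a,
      (x - 1) % (a.length : Int) = (y - 1) % (a.length : Int) → x = y) :
    ∀ xs pre res dup, (∀ x ∈ pre ++ xs, x ∈ a) → pvResInv a.length pre res → xs.Nodup →
      (∀ x ∈ xs, x ∉ pre) → (pvLoopB xs res dup).2 = dup := by
  intro xs
  induction xs with
  | nil => intro pre res dup _ _ _ _; rfl
  | cons x rest ih =>
    intro pre res dup hsub hinv hnd hfresh
    have hxa : x ∈ a := hsub x (List.mem_append_right _ List.mem_cons_self)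
    have hn : 0 < a.length := List.length_pos_iff.mpr (List.ne_nil_of_mem hxa)
    have hb := hr x hxa
    have hassoc : pre ++ x :: rest = (pre ++ [x]) ++ rest := by simp
    rw [pvLoopB_cons_in x rest res dup _
      (pv_res_get res a.length hinv.1 x hb.1 hb.2 hn)]
    have hc : ¬ res.getD (pvHome (a.length : Int) x) none = some x := by
      intro hc
      exact hfresh x List.mem_cons_self
        ((hinv.2 _ (pv_home_lt _ _ hn) x).mp hc).1
    rw [if_neg hc, pv_res_set res a.length hinv.1 x (some x) hb.1 hb.2 hn]
    refine ih (pre ++ [x]) _ dup (by rw [← hassoc]; exact hsub)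
      (pv_inv_insert _ pre res x hinv hc ?_ (pv_home_lt _ _ hn))
      (List.Nodup.of_cons hnd) ?_
    · intro p hp
      exact pv_home_inj a hinj p (hsub p (List.mem_append_left _ hp)) x hxa
    · intro y hy hmem
      rcases List.mem_append.mp hmem with h1 | h1
      · exact hfresh y (List.mem_cons_of_mem _ hy) h1
      · have hyx : y = x := by simpa using h1
        exact (List.nodup_cons.mp hnd).1 (hyx ▸ hy)

-- with exactly one duplicated value d, B's loop ends with duplicate = some d
lemma pvLoopB_snd_dup (a : List Int) (d : Int)
    (hr : ∀ x ∈ a, 1 - (a.length : Int) ≤ x ∧ x ≤ (a.length : Int))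
    (hinj : ∀ x ∈ a, ∀ y ∈ a,
      (x - 1) % (a.length : Int) = (y - 1) % (a.length : Int) → x = y)
    (huniq : ∀ x ∈ a, ∀ y ∈ a, 2 ≤ a.count x → 2 ≤ a.count y → x = y)
    (hd : 2 ≤ a.count d) :
    (pvLoopB a (List.replicate a.length none) none).2 = some d := by
  have hdm : d ∈ a := List.count_pos_iff.mp (by omega)
  have hn : 0 < a.length := List.length_pos_iff.mpr (List.ne_nil_of_mem hdm)
  obtain ⟨u, w, hsplit, hdw, hcu⟩ := pv_last_occ_split a d hdm
  have hdu : d ∈ u := List.count_pos_iff.mp (by omega)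
  have hca : ∀ x, a.count x = u.count x + w.count x + (if x = d then 1 else 0) := by
    intro x
    rw [hsplit, List.count_append, List.count_cons]
    by_cases hx : x = d <;> simp [hx] <;> omega
  have hone : ∀ x ∈ a, x ≠ d → a.count x ≤ 1 := by
    intro x hx hxd
    by_contra hh
    exact hxd (huniq x hx d hdm (by omega) (by omega))
  have hwnd : w.Nodup := by
    rw [List.nodup_iff_count_le_one]
    intro x
    by_cases hxd : x = d
    · rw [hxd, List.count_eq_zero.mpr hdw]
      omega
    · by_cases hxw : x ∈ w
      · have hxa : x ∈ a := by
          rw [hsplit]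
          exact List.mem_append_right _ (List.mem_cons_of_mem _ hxw)
        have := hone x hxa hxd
        have := hca x
        omega
      · rw [List.count_eq_zero.mpr hxw]
        omega
  have hempty : pvResInv a.length [] (List.replicate a.length none) := by
    refine ⟨by simp, ?_⟩
    intro j hj v
    constructor
    · intro h
      rw [List.getD_eq_getElem _ _ (by simpa using hj), List.getElem_replicate] at h
      cases h
    · rintro ⟨h, _⟩
      cases h
  have hsubu : ∀ x ∈ ([] : List Int) ++ u, x ∈ a := by
    intro x hx
    rw [hsplit]
    exact List.mem_append_left _ (by simpa using hx)
  have hinvu : pvResInv a.length u (pvLoopB u (List.replicate a.length none) none).1 := by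
    have := pvLoopB_resInv a hr hinj u [] (List.replicate a.length none) none hsubu hempty
    simpa using this
  have hbd := hr d hdm
  have hcur : (pvLoopB u (List.replicate a.length none) none).1.getD
      (pvHome (a.length : Int) d) none = some d :=
    (hinvu.2 _ (pv_home_lt _ _ hn) d).mpr ⟨hdu, rfl⟩
  have hsuba : ∀ x ∈ u, x ∈ a := by
    intro x hx
    rw [hsplit]
    exact List.mem_append_left _ hx
  rw [show pvLoopB a (List.replicate a.length none) none
      = pvLoopB (u ++ d :: w) (List.replicate a.length none) none from by rw [← hsplit],
    pvLoopB_append u (d :: w) (List.replicate a.length none) none (by simpa using hn)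
      (by
        intro x hx
        have := hr x (hsuba x hx)
        simpa using this),
    pvLoopB_cons_in d w _ _ _
      (pv_res_get _ a.length hinvu.1 d hbd.1 hbd.2 hn),
    hcur, if_pos rfl]
  refine pvLoopB_dup_fresh a hr hinj w (u ++ [d]) _ (some d) ?_
    (pv_inv_skip _ u _ d hinvu hcur) hwnd ?_
  · intro x hx
    rw [hsplit]
    simpa using hx
  · intro x hxw hmem
    rcases List.mem_append.mp hmem with h1 | h1
    · have hxd : x ≠ d := fun hh => hdw (hh ▸ hxw)
      have hxa : x ∈ a := by
        rw [hsplit]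
        exact List.mem_append_right _ (List.mem_cons_of_mem _ hxw)
      have h2 : 1 ≤ u.count x := List.count_pos_iff.mpr h1
      have h3 : 1 ≤ w.count x := List.count_pos_iff.mpr hxw
      have := hone x hxa hxd
      have := hca x
      simp [hxd] at this
      omega
    · have hxd : x = d := by simpa using h1
      exact hdw (hxd ▸ hxw)

-- the final scan: everything in place gives [], otherwise the first corrupt slot
lemma pvScanB_all (res : List (Option Int)) (dup : Option Int)
    (hs : ∀ j < res.length, res.getD j none = some ((j : Int) + 1)) :
    ∀ i, pvScanB res dup i = [] := by
  intro i
  have haux : ∀ k i, res.length - i ≤ k → pvScanB res dup i = [] := by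
    intro k
    induction k with
    | zero =>
      intro i hk
      rw [pvScanB, dif_neg (by omega)]
    | succ k ih =>
      intro i hk
      rw [pvScanB]
      by_cases h : i < res.length
      · rw [dif_pos h, if_neg]
        · exact ih (i + 1) (by omega)
        · have := hs i h
          rw [List.getD_eq_getElem _ _ h] at this
          simp [this]
      · rw [dif_neg h]
  exact haux (res.length - i) i le_rfl

lemma pvScanB_missing (res : List (Option Int)) (dup : Option Int) (p : Nat)
    (hp : p < res.length)
    (hbefore : ∀ j < p, res.getD j none = some ((j : Int) + 1))
    (hat : res.getD p none ≠ some ((p : Int) + 1)) :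
    ∀ i ≤ p, pvScanB res dup i = [(res.getD p none).getD (dup.getD 0), (p : Int) + 1] := by
  have haux : ∀ k i, i ≤ p → p - i ≤ k →
      pvScanB res dup i = [(res.getD p none).getD (dup.getD 0), (p : Int) + 1] := by
    intro k
    induction k with
    | zero =>
      intro i hip hk
      have : i = p := by omega
      subst this
      rw [pvScanB, dif_pos hp, if_pos]
      · rw [List.getD_eq_getElem _ _ hp]
      · rw [List.getD_eq_getElem _ _ hp] at hat
        simpa using hat
    | succ k ih =>
      intro i hip hk
      by_cases hipe : i = p
      · subst hipe
        rw [pvScanB, dif_pos hp, if_pos]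
        · rw [List.getD_eq_getElem _ _ hp]
        · rw [List.getD_eq_getElem _ _ hp] at hat
          simpa using hat
      · have hilt : i < p := lt_of_le_of_ne hip hipe
        rw [pvScanB, dif_pos (by omega), if_neg]
        · exact ih (i + 1) (by omega) (by omega)
        · have := hbefore i hilt
          rw [List.getD_eq_getElem _ _ (by omega)] at this
          simp [this]
  exact fun i hip => haux (p - i) i hip le_rfl

-- a value j+1 of the array always ends up in its slot j
lemma pv_nondefect_of_mem (b : List Int) (j : Nat)
    (hg : ∀ j < b.length, pvGood b j)
    (hj : j < b.length) (hmem : ((j : Int) + 1) ∈ b) : b.getD j 0 = (j : Int) + 1 := by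
  obtain ⟨k, hk, hkx⟩ := List.mem_iff_getElem.mp hmem
  have hgd : b.getD k 0 = (j : Int) + 1 := by rw [List.getD_eq_getElem _ _ hk, hkx]
  rcases hg k hk with h1 | h2
  · have hkj : k = j := by
      rw [hgd] at h1
      omega
    subst hkj
    exact hgd
  · rw [hgd] at h2
    have hhome : pvHome (b.length : Int) ((j : Int) + 1) = j := by
      unfold pvHome
      have h0 : ((j : Int) + 1 - 1) = (j : Int) := by ring
      rw [h0, Int.emod_eq_of_lt (by omega) (by omega)]
      omega
    rw [hhome] at h2
    exact h2

-- ===== VERDICT (by name: the statement is the Claim_ definition above) =====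
theorem find_corrupt_pair_spec : Claim_equal_find_corrupt_pair := by
  unfold Claim_equal_find_corrupt_pair
  intro a _hdom hpre
  obtain ⟨hr, hinj, huniq⟩ := hpre
  unfold Spec_find_corrupt_pair
  by_cases hnil : a = []
  · subst hnil
    have h1 : find_corrupt_pair [] = [] := by
      simp [find_corrupt_pair, pvLoopA, pvScanA]
    have h2 : find_corrupt_pair_alt [] = [] := by
      simp [find_corrupt_pair_alt, pvLoopB, pvScanB]
    rw [h1, h2]
  · have hn : 0 < a.length := List.length_pos_iff.mpr hnil
    have hinv0 : pvInv a a 0 := ⟨List.Perm.refl a, Nat.zero_le _, fun j hj => absurd hj (by omega)⟩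
    have hbadle : pvBad a ≤ a.length := by
      unfold pvBad
      exact le_trans List.countP_le_length (by simp)
    have hpost := pvLoopA_post a hr hinj (2 * a.length + 1) a 0 hinv0 (by omega)
    set b := pvLoopA (2 * a.length + 1) a 0 with hbdef
    obtain ⟨hperm, _, hgood⟩ := hpost
    have hlen : b.length = a.length := hperm.length_eq
    have hA : find_corrupt_pair a = pvScanA b 0 := rfl
    set r := pvLoopB a (List.replicate a.length none) none with hrdef
    have hB : find_corrupt_pair_alt a = pvScanB r.1 r.2 0 := rfl
    have hempty : pvResInv a.length [] (List.replicate a.length none) := by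
      refine ⟨by simp, ?_⟩
      intro j hj v
      constructor
      · intro h
        rw [List.getD_eq_getElem _ _ (by simpa using hj), List.getElem_replicate] at h
        cases h
      · rintro ⟨h, _⟩
        cases h
    have hinvR : pvResInv a.length a r.1 := by
      have := pvLoopB_resInv a hr hinj a [] (List.replicate a.length none) none
        (by simp) hempty
      rw [hrdef]
      simpa using this
    obtain ⟨hrlen, hrif⟩ := hinvR
    have hmemb : ∀ x : Int, x ∈ b ↔ x ∈ a := fun x => hperm.mem_iff
    have hrb : ∀ x ∈ b, 1 - (b.length : Int) ≤ x ∧ x ≤ (b.length : Int) := by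
      intro x hx
      rw [hlen]
      exact hr x (hperm.subset hx)
    by_cases hmiss : ∀ j : Nat, j < a.length → ((j : Int) + 1) ∈ a
    · -- every value 1..n present: the array is already a permutation, both sides return []
      have hsorted : ∀ j < b.length, b.getD j 0 = (j : Int) + 1 := by
        intro j hj
        exact pv_nondefect_of_mem b j hgood hj ((hmemb _).mpr (hmiss j (by omega)))
      have hall : ∀ j < r.1.length, r.1.getD j none = some ((j : Int) + 1) := by
        intro j hj
        rw [hrlen] at hj
        refine (hrif j hj ((j : Int) + 1)).mpr ⟨hmiss j hj, ?_⟩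
        unfold pvHome
        have h0 : ((j : Int) + 1 - 1) = (j : Int) := by ring
        rw [h0, Int.emod_eq_of_lt (by omega) (by omega)]
        omega
      rw [hA, hB, pv_scan_nil b hsorted 0, pvScanB_all r.1 r.2 hall 0]
    · -- some value of 1..n missing: p is the first missing slot
      push_neg at hmiss
      have hex : ∃ j : Nat, j < a.length ∧ ((j : Int) + 1) ∉ a := hmiss
      set p := Nat.find hex with hpdef
      obtain ⟨hp, hpnm⟩ := Nat.find_spec hex
      have hbef_mem : ∀ j : Nat, j < p → ((j : Int) + 1) ∈ a := by
        intro j hjp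
        by_contra hh
        exact (Nat.find_min hex hjp) ⟨by omega, hh⟩
      have hplen : p < b.length := by omega
      have hbefore : ∀ j < p, b.getD j 0 = (j : Int) + 1 := fun j hjp =>
        pv_nondefect_of_mem b j hgood (by omega) ((hmemb _).mpr (hbef_mem j hjp))
      have hpdefect : b.getD p 0 ≠ (p : Int) + 1 := by
        intro hh
        apply hpnm
        rw [← hmemb ((p : Int) + 1), ← hh, List.getD_eq_getElem _ _ hplen]
        exact List.getElem_mem hplen
      have hAv : pvScanA b 0 = [b.getD p 0, (p : Int) + 1] :=
        pv_scan_defect b p hplen hbefore hpdefect 0 (Nat.zero_le _)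
      have hbefore_slot : ∀ j < p, r.1.getD j none = some ((j : Int) + 1) := by
        intro j hj
        refine (hrif j (by omega) ((j : Int) + 1)).mpr ⟨hbef_mem j hj, ?_⟩
        unfold pvHome
        have h0 : ((j : Int) + 1 - 1) = (j : Int) := by ring
        rw [h0, Int.emod_eq_of_lt (by omega) (by omega)]
        omega
      have hat : r.1.getD p none ≠ some ((p : Int) + 1) := by
        intro hh
        exact hpnm ((hrif p (by omega) ((p : Int) + 1)).mp hh).1
      have hBv : pvScanB r.1 r.2 0
          = [(r.1.getD p none).getD (r.2.getD 0), (p : Int) + 1] :=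
        pvScanB_missing r.1 r.2 p (by omega) hbefore_slot hat 0 (Nat.zero_le _)
      rw [hA, hAv, hB, hBv]
      have hval : (r.1.getD p none).getD (r.2.getD 0) = b.getD p 0 := by
        cases hslot : r.1.getD p none with
        | some v₀ =>
          obtain ⟨hv₀a, hv₀k⟩ := (hrif p (by omega) v₀).mp hslot
          have hv₀b : v₀ ∈ b := (hmemb _).mpr hv₀a
          obtain ⟨k, hk, hkx⟩ := List.mem_iff_getElem.mp hv₀b
          have hgdk : b.getD k 0 = v₀ := by rw [List.getD_eq_getElem _ _ hk, hkx]
          have hhome : pvHome (b.length : Int) v₀ = p := by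
            rw [hlen]
            exact hv₀k
          rcases hgood k hk with h1 | h2
          · exfalso
            rw [hgdk] at h1
            have hhk : pvHome (b.length : Int) v₀ = k := by
              unfold pvHome
              rw [h1]
              have e : ((k : Int) + 1 - 1) = (k : Int) := by ring
              rw [e, Int.emod_eq_of_lt (by omega) (by omega)]
              omega
            have hkp : k = p := by omega
            apply hpdefect
            rw [← hkp] at *
            rw [hgdk, h1]
          · rw [hgdk, hhome] at h2
            rw [h2]
            rfl
        | none =>
          rcases pv_defect_cases b p hrb hgood hplen hpdefect with ⟨hle, hhome⟩ | hcnt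
          · exfalso
            have hpa : b.getD p 0 ∈ a := (hmemb _).mp
              (by rw [List.getD_eq_getElem _ _ hplen]; exact List.getElem_mem hplen)
            have hsome : r.1.getD p none = some (b.getD p 0) := by
              refine (hrif p (by omega) (b.getD p 0)).mpr ⟨hpa, ?_⟩
              rw [← hlen]
              exact hhome
            rw [hsome] at hslot
            cases hslot
          · have hcnta : 2 ≤ a.count (b.getD p 0) := by
              rw [← hperm.count_eq]
              exact hcnt
            have hdup := pvLoopB_snd_dup a (b.getD p 0) hr hinj huniq hcnta
            rw [← hrdef] at hdup
            rw [hdup]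
            simp
      rw [hval]
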